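-- pv_equiv track=rewrite | github.com/lukaspestalozzi/Tichu | gym-tichu/gym_tichu/envs/internals/utils.py | crange
-- ===== SOURCE A (Python) =====
-- def crange(start, stop, modulo):
--     """
--     Circular range generator.
--     :param start: int, start integer (included)
--     :param stop: stop integer (excluded), If start == stop, then a whole circle is returned. ie. crange(0, 0, 4) -> [0, 1, 2, 3]
--     :param modulo: the modulo of the range
--     >>> list(crange(0, 5, 10))
--     [0, 1, 2, 3, 4]
--     >>> list(crange(7, 3, 10))
--     [7, 8, 9, 0, 1, 2]
--     >>> list(crange(0, 10, 4))
--     [0, 1]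
--     >>> list(crange(13, 10, 4))
--     [1]
--     >>> list(crange(0, 0, 4))
--     [0, 1, 2, 3]
--     >>> list(crange(6, 6, 4))
--     [2, 3, 0, 1]
--     >>> list(crange(1, 2, 4))
--     [1]
--     >>> list(crange(1, 4, 4))
--     [1, 2, 3]
--     >>> list(crange(3, 2, 4))
--     [3, 0, 1]
--     >>> list(crange(3, 0, 4))
--     [3]
--     >>> list(crange(2, 3, 4))
--     [2]
--     >>> list(crange(2, 1, 4))
--     [2, 3, 0]
--     """
--     startmod = start % modulo
--     stopmod = stop % modulo
--     yield startmod
--     k = (startmod + 1) % modulo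
--     while k != stopmod:
--         yield k
--         k = (k + 1) % modulo
-- ===== SOURCE B (Python) =====
-- def crange(start, stop, modulo):
--     # count-then-emit: precompute the number of elements, then yield them by index
--     m = abs(modulo)
--     count = (stop - start) % m or m
--     for i in range(count):
--         yield (start + i) % modulo
-- ===== Notes on version B (the rewrite author's own statement) =====
-- stated objective: simpler
-- what changed: B precomputes the element count ((stop-start) % abs(modulo), or abs(modulo) for the whole-circle case) and emits (start+i) % modulo by index, replacing A's cursor-increment-until-equal-stopmod while loop.
import Mathlib
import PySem

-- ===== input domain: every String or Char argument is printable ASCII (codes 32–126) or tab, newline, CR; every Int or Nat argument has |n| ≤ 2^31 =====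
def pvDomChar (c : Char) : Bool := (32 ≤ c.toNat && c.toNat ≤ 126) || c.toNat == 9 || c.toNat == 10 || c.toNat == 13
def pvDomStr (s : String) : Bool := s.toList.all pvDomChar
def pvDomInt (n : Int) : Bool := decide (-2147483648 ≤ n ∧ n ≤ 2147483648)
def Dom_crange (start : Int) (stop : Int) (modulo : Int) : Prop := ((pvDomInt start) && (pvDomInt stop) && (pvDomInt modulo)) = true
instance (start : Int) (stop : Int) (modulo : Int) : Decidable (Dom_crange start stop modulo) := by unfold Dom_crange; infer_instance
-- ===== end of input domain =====

-- B replaces A's cursor-until-equal while loop by a precomputed count and index-driven emission (simpler decomposition, same cost).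
-- Both Pythons raise ZeroDivisionError when modulo = 0; Pre_ excludes exactly that.

-- ===== PORT A =====
-- the 'while k != stopmod' loop; fuel modulo.natAbs bounds the cycle length (the loop revisits a residue within |modulo| steps)
def crangeLoopA : Nat → Int → Int → Int → List Int
  | 0, _, _, _ => []
  | fuel + 1, k, stopmod, m =>
    if k = stopmod then []
    else k :: crangeLoopA fuel (PySem.Int.mod (k + 1) m) stopmod m

def crange (start : Int) (stop : Int) (modulo : Int) : List Int :=
  let startmod := PySem.Int.mod start modulo
  let stopmod := PySem.Int.mod stop modulo
  startmod :: crangeLoopA modulo.natAbs (PySem.Int.mod (startmod + 1) modulo) stopmod modulo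

-- ===== PORT B =====
def crange_alt (start : Int) (stop : Int) (modulo : Int) : List Int :=
  let m := |modulo|
  let count0 := PySem.Int.mod (stop - start) m
  let count := if count0 = 0 then m else count0          -- 'x or m'
  (PySem.List.pyRange 0 count 1).map (fun i => PySem.Int.mod (start + i) modulo)

-- ===== PRECONDITION & SPEC =====
-- modulo = 0 makes the Python A raise ZeroDivisionError (and B too); everything else is admitted
def Pre_crange (start : Int) (stop : Int) (modulo : Int) : Prop := modulo ≠ 0
instance (start : Int) (stop : Int) (modulo : Int) : Decidable (Pre_crange start stop modulo) := by unfold Pre_crange; infer_instance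
def pvWitness_crange : Int × Int × Int := (7, 3, 10)

def Spec_crange (start : Int) (stop : Int) (modulo : Int) (out : List Int) : Prop := out = crange_alt start stop modulo
instance (start : Int) (stop : Int) (modulo : Int) (out : List Int) : Decidable (Spec_crange start stop modulo out) := by unfold Spec_crange; infer_instance

-- ===== CLAIM (what is proved, stated in full; the proofs are below) =====
def Claim_equal_crange : Prop := ∀ (start : Int) (stop : Int) (modulo : Int), Dom_crange start stop modulo → Pre_crange start stop modulo → Spec_crange start stop modulo (crange start stop modulo)

-- ===== LEMMAS AND PROOFS =====

-- two residues mod m agree iff m divides their difference (m ≠ 0)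
theorem pymod_eq_iff_dvd (a b m : Int) (hm : m ≠ 0) :
    PySem.Int.mod a m = PySem.Int.mod b m ↔ m ∣ (b - a) := by
  have ha := PySem.Int.floordiv_mul_add_mod a m
  have hb := PySem.Int.floordiv_mul_add_mod b m
  constructor
  · intro h
    refine ⟨PySem.Int.floordiv b m - PySem.Int.floordiv a m, ?_⟩
    have : b - a = (PySem.Int.floordiv b m * m + PySem.Int.mod b m)
        - (PySem.Int.floordiv a m * m + PySem.Int.mod a m) := by rw [ha, hb]
    rw [this, h]; ring
  · rintro ⟨c, hc⟩
    have hdiff : PySem.Int.mod b m - PySem.Int.mod a m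
        = m * (c - PySem.Int.floordiv b m + PySem.Int.floordiv a m) := by
      linear_combination hc + hb - ha
    have hdvd : |m| ∣ (PySem.Int.mod b m - PySem.Int.mod a m) :=
      (abs_dvd m _).mpr ⟨_, hdiff⟩
    have hb' : |PySem.Int.mod b m - PySem.Int.mod a m| < |m| := by
      rcases lt_or_gt_of_ne hm with hneg | hpos
      · have h1 := PySem.Int.mod_neg_bounds a hneg
        have h2 := PySem.Int.mod_neg_bounds b hneg
        rw [abs_lt, abs_of_neg hneg]; omega
      · have h1n := PySem.Int.mod_nonneg a hpos
        have h1l := PySem.Int.mod_lt a hpos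
        have h2n := PySem.Int.mod_nonneg b hpos
        have h2l := PySem.Int.mod_lt b hpos
        rw [abs_lt, abs_of_pos hpos]; omega
    have := Int.eq_zero_of_abs_lt_dvd hdvd hb'
    omega

-- (a % m + 1) % m = (a + 1) % m
theorem pymod_add_one (a m : Int) (hm : m ≠ 0) :
    PySem.Int.mod (PySem.Int.mod a m + 1) m = PySem.Int.mod (a + 1) m := by
  rw [pymod_eq_iff_dvd _ _ _ hm]
  have := PySem.Int.floordiv_mul_add_mod a m
  exact ⟨PySem.Int.floordiv a m, by linarith⟩

-- the loop, started at residue (a % m) with c = ((stp - a) % |m|) steps remaining, emits (a+i) % m for i < c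
theorem loopA_eq (m : Int) (hm : m ≠ 0) :
    ∀ (c : Nat) (fuel : Nat) (a stp : Int), c ≤ fuel →
    (c : Int) = PySem.Int.mod (stp - a) |m| →
    crangeLoopA fuel (PySem.Int.mod a m) (PySem.Int.mod stp m) m
      = (List.range c).map (fun i : Nat => PySem.Int.mod (a + (i : Int)) m) := by
  intro c
  induction c with
  | zero =>
    intro fuel a stp _ hc
    have hdvd : m ∣ (stp - a) := by
      have h0 : PySem.Int.mod (stp - a) |m| = 0 := by omega
      have := (PySem.Int.mod_eq_zero_iff_dvd (stp - a) |m|).mp h0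
      exact (abs_dvd m (stp - a)).mp this
    have heq : PySem.Int.mod a m = PySem.Int.mod stp m :=
      (pymod_eq_iff_dvd a stp m hm).mpr hdvd
    cases fuel with
    | zero => simp [crangeLoopA]
    | succ f => simp [crangeLoopA, heq]
  | succ c ih =>
    intro fuel a stp hfuel hc
    have hMpos : (0:Int) < |m| := abs_pos.mpr hm
    have hne : PySem.Int.mod a m ≠ PySem.Int.mod stp m := by
      intro h
      have hdvd := (pymod_eq_iff_dvd a stp m hm).mp h
      have : PySem.Int.mod (stp - a) |m| = 0 :=
        (PySem.Int.mod_eq_zero_iff_dvd (stp - a) |m|).mpr ((abs_dvd m (stp - a)).mpr hdvd)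
      omega
    obtain ⟨f, rfl⟩ : ∃ f, fuel = f + 1 := ⟨fuel - 1, by omega⟩
    have hstep : crangeLoopA (f + 1) (PySem.Int.mod a m) (PySem.Int.mod stp m) m
        = PySem.Int.mod a m
          :: crangeLoopA f (PySem.Int.mod (PySem.Int.mod a m + 1) m) (PySem.Int.mod stp m) m := by
      simp [crangeLoopA, hne]
    rw [hstep, pymod_add_one a m hm]
    -- decrement: ((stp - (a+1)) % |m|) = c
    have hdec : (c : Int) = PySem.Int.mod (stp - (a + 1)) |m| := by
      rw [PySem.Int.mod_eq_emod_of_pos hMpos] at hc ⊢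
      have h1 : (stp - (a+1)) % |m| = ((stp - a) % |m| - 1) % |m| := by
        rw [show stp - (a+1) = (stp - a) - 1 by ring, Int.sub_emod (stp - a) 1,
          Int.sub_emod ((stp - a) % |m|) 1, Int.emod_emod_of_dvd _ (dvd_refl _)]
      have hb1 : 0 ≤ (stp - a) % |m| := Int.emod_nonneg _ (by omega)
      have hb2 : (stp - a) % |m| < |m| := Int.emod_lt_of_pos _ hMpos
      rw [h1, Int.emod_eq_of_lt (by omega) (by omega)]
      omega
    rw [ih f (a + 1) stp (by omega) hdec]
    rw [List.range_succ_eq_map, List.map_cons, List.map_map]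
    congr 1
    · norm_num
    · apply List.map_congr_left
      intro i _
      simp only [Function.comp]
      congr 1
      push_cast
      ring

-- ===== VERDICT (by name: the statement is the Claim_ definition above) =====
theorem crange_spec : Claim_equal_crange := by
  intro start stop modulo _ hm
  unfold Spec_crange crange crange_alt
  simp only []
  have hMpos : (0:Int) < |modulo| := abs_pos.mpr hm
  -- B's list, rewritten through pyRange_one
  rw [PySem.List.pyRange_one]
  set count0 := PySem.Int.mod (stop - start) |modulo| with hcount0
  have hb1 : 0 ≤ count0 := PySem.Int.mod_nonneg _ hMpos
  have hb2 : count0 < |modulo| := PySem.Int.mod_lt _ hMpos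
  set count : Int := if count0 = 0 then |modulo| else count0 with hcount
  have hcpos : 1 ≤ count := by rw [hcount]; split <;> omega
  -- A's head uses (startmod + 1) % m = (start + 1) % m
  rw [pymod_add_one start modulo hm]
  -- remaining steps for the loop
  have hc : ((count - 1).toNat : Int) = PySem.Int.mod (stop - (start + 1)) |modulo| := by
    rw [PySem.Int.mod_eq_emod_of_pos hMpos]
    have h1 : (stop - (start+1)) % |modulo| = (count0 - 1) % |modulo| := by
      rw [hcount0, PySem.Int.mod_eq_emod_of_pos hMpos]
      rw [show stop - (start+1) = (stop - start) - 1 by ring, Int.sub_emod (stop - start) 1,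
        Int.sub_emod ((stop - start) % |modulo|) 1, Int.emod_emod_of_dvd _ (dvd_refl _)]
    rw [h1]
    rw [hcount]
    by_cases h0 : count0 = 0
    · simp only [h0, if_pos]
      rw [show (0:Int) - 1 = -1 by ring]
      rw [show (-1 : Int) % |modulo| = |modulo| - 1 by
        conv_lhs => rw [show (-1:Int) = (|modulo| - 1) + |modulo| * (-1) by ring]
        rw [Int.add_mul_emod_self_left, Int.emod_eq_of_lt (by omega) (by omega)]]
      omega
    · rw [if_neg h0, Int.emod_eq_of_lt (by omega) (by omega)]
      omega
  have hfuel : (count - 1).toNat ≤ modulo.natAbs := by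
    have : |modulo| = (modulo.natAbs : Int) := Int.abs_eq_natAbs modulo
    omega
  rw [loopA_eq modulo hm (count - 1).toNat modulo.natAbs (start + 1) stop hfuel hc]
  -- now both sides are explicit maps over ranges
  have hcn : count.toNat = (count - 1).toNat + 1 := by omega
  rw [Int.sub_zero, List.map_map, hcn, List.range_succ_eq_map, List.map_cons, List.map_map]
  congr 1
  · norm_num
  · apply List.map_congr_left
    intro i _
    simp only [Function.comp]
    congr 1
    push_cast
    ring
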